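-- pv_equiv track=rewrite | github.com/auphong2707/movie-data-analysis-pipeline | layers/batch_layer/master_dataset/partitioning.py | _clean_partition_value
-- ===== SOURCE A (Python) =====
-- def _clean_partition_value(value: str) -> str:
--     """
--     Clean partition value for filesystem compatibility.
--
--     Args:
--         value: Raw partition value
--
--     Returns:
--         str: Cleaned value safe for filesystem use
--     """
--     if not value:
--         return "unknown"
--
--     # Replace problematic characters
--     cleaned = value.lower()
--     cleaned = cleaned.replace(" ", "_")
--     cleaned = cleaned.replace("-", "_")
--     cleaned = cleaned.replace("&", "and")
--     cleaned = "".join(c for c in cleaned if c.isalnum() or c == "_")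
--
--     # Ensure it's not empty and doesn't start with number
--     if not cleaned or cleaned[0].isdigit():
--         cleaned = "genre_" + cleaned
--
--     return cleaned[:50]  # Limit length
-- ===== SOURCE B (Python) =====
-- def _clean_partition_value(value: str) -> str:
--     if not value:
--         return "unknown"
--     parts = []
--     for ch in value:
--         c = ch.lower()
--         if c == " " or c == "-":
--             parts.append("_")
--         elif c == "&":
--             parts.append("and")
--         elif c.isalnum() or c == "_":
--             parts.append(c)
--     cleaned = "".join(parts)
--     if not cleaned or cleaned[0].isdigit():
--         cleaned = "genre_" + cleaned
--     return cleaned[:50]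
-- ===== Notes on version B (the rewrite author's own statement) =====
-- stated objective: alternative
-- what changed: Replaced the three sequential whole-string .replace passes plus a filtering join by a single left-to-right per-character scan that lowercases, substitutes and filters each character in one pass; it trades CPython's C-level string passes for one explicit loop.
import Mathlib
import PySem

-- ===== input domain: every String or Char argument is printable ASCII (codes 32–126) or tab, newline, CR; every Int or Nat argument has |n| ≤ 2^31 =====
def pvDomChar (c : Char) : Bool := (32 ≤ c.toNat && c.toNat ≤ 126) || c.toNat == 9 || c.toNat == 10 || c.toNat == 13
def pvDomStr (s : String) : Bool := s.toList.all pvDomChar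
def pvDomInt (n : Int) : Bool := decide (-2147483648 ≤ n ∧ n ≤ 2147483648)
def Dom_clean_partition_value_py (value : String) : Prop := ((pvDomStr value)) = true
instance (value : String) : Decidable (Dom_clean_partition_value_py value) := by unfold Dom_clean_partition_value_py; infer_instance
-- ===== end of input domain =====

-- B replaces A's three whole-string .replace passes plus a filtering join by one
-- left-to-right scan handling each character once (objective: alternative decomposition).


-- ===== PORT A =====
def clean_partition_value_py (value : String) : String :=
  if value.toList = [] then "unknown"
  else
    let cleaned := PySem.Chars.lower value.toList
    let cleaned := PySem.Chars.replace cleaned [' '] ['_']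
    let cleaned := PySem.Chars.replace cleaned ['-'] ['_']
    let cleaned := PySem.Chars.replace cleaned ['&'] ['a','n','d']
    let cleaned := cleaned.filter (fun c => PySem.Chars.isalnum c || c == '_')
    let cleaned :=
      match cleaned with
      | [] => ['g','e','n','r','e','_']
      | c :: _ => if PySem.Chars.isdigit c then ['g','e','n','r','e','_'] ++ cleaned else cleaned
    String.ofList (PySem.List.slice cleaned none (some 50))

-- ===== PORT B =====
def cleanCharStep (ch : Char) : List Char :=
  let c := PySem.Chars.lowerChar ch
  if c = ' ' ∨ c = '-' then ['_']
  else if c = '&' then ['a', 'n', 'd']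
  else if PySem.Chars.isalnum c || c == '_' then [c]
  else []

def clean_partition_value_py_alt (value : String) : String :=
  if value.toList = [] then "unknown"
  else
    let cleaned := value.toList.foldl (fun acc ch => acc ++ cleanCharStep ch) []
    let cleaned :=
      match cleaned with
      | [] => ['g','e','n','r','e','_']
      | c :: _ => if PySem.Chars.isdigit c then ['g','e','n','r','e','_'] ++ cleaned else cleaned
    String.ofList (PySem.List.slice cleaned none (some 50))

-- ===== PRECONDITION & SPEC =====
def Spec_clean_partition_value_py (value : String) (out : String) : Prop := out = clean_partition_value_py_alt value
instance (value : String) (out : String) : Decidable (Spec_clean_partition_value_py value out) := by unfold Spec_clean_partition_value_py; infer_instance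

-- ===== CLAIM (what is proved, stated in full; the proofs are below) =====
def Claim_equal_clean_partition_value_py : Prop := ∀ (value : String), Dom_clean_partition_value_py value → Spec_clean_partition_value_py value (clean_partition_value_py value)

-- ===== LEMMAS AND PROOFS =====

-- single-character replace is a flatMap substitution
theorem replace_go_single (a : Char) (new : List Char) :
    ∀ (fuel : Nat) (s acc : List Char), s.length ≤ fuel →
      PySem.Chars.replace.go [a] new fuel s acc
        = acc.reverse ++ s.flatMap (fun c => if c = a then new else [c]) := by
  intro fuel
  induction fuel with
  | zero =>
    intro s acc h
    have : s = [] := List.eq_nil_of_length_eq_zero (Nat.le_zero.mp h)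
    subst this
    simp [PySem.Chars.replace.go]
  | succ n ih =>
    intro s acc h
    cases s with
    | nil => simp [PySem.Chars.replace.go]
    | cons c t =>
      have ht : t.length ≤ n := by simpa using h
      by_cases hc : c = a
      · subst hc
        have hpre : List.isPrefixOf [c] (c :: t) = true := by
          simp [List.isPrefixOf]
        simp only [PySem.Chars.replace.go, hpre, if_pos]
        rw [ih _ _ (by simpa using ht)]
        simp
      · have hpre : List.isPrefixOf [a] (c :: t) = false := by
          simp [List.isPrefixOf]
          exact fun h' => absurd h'.symm hc
        simp only [PySem.Chars.replace.go, hpre]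
        rw [ih _ _ ht]
        simp [hc]

theorem replace_single (a : Char) (new s : List Char) :
    PySem.Chars.replace s [a] new = s.flatMap (fun c => if c = a then new else [c]) := by
  have : ([a] : List Char).isEmpty = false := rfl
  simp only [PySem.Chars.replace, this, Bool.false_eq_true, if_false]
  simpa using replace_go_single a new s.length s [] (le_refl _)

-- per-character agreement of A's pipeline and B's step
theorem per_char (ch : Char) :
    (if PySem.Chars.lowerChar ch = ' ' then ['_'] else [PySem.Chars.lowerChar ch]).flatMap
      (fun a => (if a = '-' then ['_'] else [a]).flatMap
        (fun b => (if b = '&' then ['a','n','d'] else [b]).filter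
          (fun c => PySem.Chars.isalnum c || c == '_')))
      = cleanCharStep ch := by
  set c := PySem.Chars.lowerChar ch with hc
  by_cases h1 : c = ' '
  · simp [h1, cleanCharStep, ← hc, List.filter, PySem.Chars.isalnum, PySem.Chars.isalpha,
      PySem.Chars.isupper, PySem.Chars.islower, PySem.Chars.isdigit]
  · by_cases h2 : c = '-'
    · simp [h2, cleanCharStep, ← hc, List.filter, PySem.Chars.isalnum, PySem.Chars.isalpha,
        PySem.Chars.isupper, PySem.Chars.islower, PySem.Chars.isdigit]
    · by_cases h3 : c = '&'
      · simp [h3, cleanCharStep, ← hc, List.filter, PySem.Chars.isalnum,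
          PySem.Chars.isalpha, PySem.Chars.isupper, PySem.Chars.islower, PySem.Chars.isdigit]
      · by_cases h4 : (PySem.Chars.isalnum c || c == '_') = true
        · simp [h1, h2, h3, h4, cleanCharStep, ← hc, List.filter]
        · simp [h1, h2, h3, cleanCharStep, ← hc, List.filter,
            Bool.not_eq_true] at h4 ⊢
          rw [show (c == '_') = false from by simpa using h4.2]
          simp [h4.1, h4.2]

-- the cleaned character lists of the two ports coincide
theorem cleaned_eq (s : List Char) :
    ((PySem.Chars.replace
        (PySem.Chars.replace
          (PySem.Chars.replace (PySem.Chars.lower s) [' '] ['_'])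
          ['-'] ['_'])
        ['&'] ['a','n','d']).filter (fun c => PySem.Chars.isalnum c || c == '_'))
      = s.foldl (fun acc ch => acc ++ cleanCharStep ch) [] := by
  rw [PySem.List.foldl_append_eq_flatMap]
  simp only [List.nil_append, replace_single, PySem.Chars.lower, List.flatMap_map,
    List.flatMap_assoc, List.filter_flatMap]
  apply List.flatMap_congr
  intro ch _
  simpa using per_char ch

theorem clean_partition_value_py_spec_aux (value : String) :
    clean_partition_value_py value = clean_partition_value_py_alt value := by
  unfold clean_partition_value_py clean_partition_value_py_alt
  by_cases h : value.toList = []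
  · simp [h]
  · simp only [h, if_false]
    rw [cleaned_eq]

-- ===== VERDICT (by name: the statement is the Claim_ definition above) =====
theorem clean_partition_value_py_spec : Claim_equal_clean_partition_value_py := by
  intro value _
  exact clean_partition_value_py_spec_aux value
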